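-- pv_equiv track=rewrite | github.com/jayblitz/Nadobro_bot | src/nadobro/services/onboarding_service.py | _compute_complete
-- ===== SOURCE A (Python) =====
-- ONBOARDING_STEPS = ["welcome", "mode", "key", "funding", "risk", "template"]
--
-- SKIPPABLE_STEPS = {"risk", "template"}
--
-- def _compute_complete(state: dict) -> bool:
--     completed = set(state.get("completed_steps", []))
--     skipped = set(state.get("skipped_steps", []))
--     for step in ONBOARDING_STEPS:
--         if step in SKIPPABLE_STEPS:
--             if step not in completed and step not in skipped:
--                 return False
--         elif step not in completed:
--             return False
--     return True
-- ===== SOURCE B (Python) =====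
-- ONBOARDING_STEPS = ["welcome", "mode", "key", "funding", "risk", "template"]
--
-- SKIPPABLE_STEPS = {"risk", "template"}
--
-- def _compute_complete(state: dict) -> bool:
--     # Subtractive worklist: start with every step pending, discharge pendings
--     # by scanning the state's own lists, done iff nothing is left pending.
--     pending = list(ONBOARDING_STEPS)
--     for step in state.get("completed_steps", []):
--         pending = [s for s in pending if s != step]
--     for step in state.get("skipped_steps", []):
--         if step in SKIPPABLE_STEPS:
--             pending = [s for s in pending if s != step]
--     return not pending
-- ===== Notes on version B (the rewrite author's own statement) =====
-- stated objective: alternative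
-- what changed: Inverts the traversal: instead of scanning the constant step list and testing membership in sets built from the state, B keeps a pending worklist of all steps and scans the state's completed/skipped lists, filtering discharged steps out of the worklist; complete iff the worklist empties.
import Mathlib
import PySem

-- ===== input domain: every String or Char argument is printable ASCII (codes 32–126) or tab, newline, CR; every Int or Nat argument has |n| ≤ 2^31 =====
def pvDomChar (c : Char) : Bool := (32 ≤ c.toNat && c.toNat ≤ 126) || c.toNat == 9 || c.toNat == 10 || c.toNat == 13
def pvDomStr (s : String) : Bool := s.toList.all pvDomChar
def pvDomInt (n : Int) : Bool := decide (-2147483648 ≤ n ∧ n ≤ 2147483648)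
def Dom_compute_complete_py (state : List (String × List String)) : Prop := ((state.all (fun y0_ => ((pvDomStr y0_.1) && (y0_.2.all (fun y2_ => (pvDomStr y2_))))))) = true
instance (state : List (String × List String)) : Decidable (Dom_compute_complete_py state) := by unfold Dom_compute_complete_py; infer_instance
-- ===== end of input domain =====

-- B inverts the traversal: a pending worklist of all steps is filtered down by scanning the state's lists; complete iff it empties. Same cost, alternative algorithm.
-- ===== PORT A =====
def onboardingStepsPy : List String := ["welcome", "mode", "key", "funding", "risk", "template"]

def skippableStepsPy : PySem.Set String := PySem.Set.ofList ["risk", "template"]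

-- the 'for step in ONBOARDING_STEPS' loop with its early returns
def computeLoopA (completed skipped : PySem.Set String) : List String → Bool
  | [] => true
  | step :: rest =>
    if PySem.Set.contains skippableStepsPy step then
      if !(PySem.Set.contains completed step) && !(PySem.Set.contains skipped step) then false
      else computeLoopA completed skipped rest
    else if !(PySem.Set.contains completed step) then false
    else computeLoopA completed skipped rest

def compute_complete_py (state : List (String × List String)) : Bool :=
  let completed := PySem.Set.ofList (PySem.Dict.getD (PySem.Dict.ofList state) "completed_steps" [])
  let skipped := PySem.Set.ofList (PySem.Dict.getD (PySem.Dict.ofList state) "skipped_steps" [])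
  computeLoopA completed skipped onboardingStepsPy

-- ===== PORT B =====
def compute_complete_py_alt (state : List (String × List String)) : Bool :=
  let completed := PySem.Dict.getD (PySem.Dict.ofList state) "completed_steps" []
  let skipped := PySem.Dict.getD (PySem.Dict.ofList state) "skipped_steps" []
  let pending1 := completed.foldl (fun p step => p.filter (fun s => s != step)) onboardingStepsPy
  let pending2 := skipped.foldl
    (fun p step => if PySem.Set.contains skippableStepsPy step then p.filter (fun s => s != step) else p) pending1
  pending2.isEmpty

-- ===== PRECONDITION & SPEC =====
def Spec_compute_complete_py (state : List (String × List String)) (out : Bool) : Prop := out = compute_complete_py_alt state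
instance (state : List (String × List String)) (out : Bool) : Decidable (Spec_compute_complete_py state out) := by unfold Spec_compute_complete_py; infer_instance

-- ===== CLAIM (what is proved, stated in full; the proofs are below) =====
def Claim_equal_compute_complete_py : Prop := ∀ (state : List (String × List String)), Dom_compute_complete_py state → Spec_compute_complete_py state (compute_complete_py state)

-- ===== LEMMAS AND PROOFS =====
-- A's loop is 'all steps pass their membership test'
theorem loop_all (c s : PySem.Set String) (l : List String) :
    computeLoopA c s l = l.all (fun step =>
      if PySem.Set.contains skippableStepsPy step then c.contains step || s.contains step
      else c.contains step) := by
  induction l with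
  | nil => rfl
  | cons h t ih =>
    cases hs : PySem.Set.contains skippableStepsPy h <;>
      simp only [computeLoopA, hs, List.all_cons, ih] <;>
      cases c.contains h <;> cases s.contains h <;> simp

-- membership in B's first fold: x survives iff it is not discharged by the completed list
theorem mem_fold1 (l p : List String) (x : String) :
    x ∈ l.foldl (fun p step => p.filter (fun s => s != step)) p ↔ x ∈ p ∧ x ∉ l := by
  induction l generalizing p with
  | nil => simp
  | cons h t ih =>
    simp only [List.foldl_cons, ih, List.mem_filter, List.mem_cons, bne_iff_ne, ne_eq]
    tauto

-- membership in B's second fold: a skippable x is additionally discharged by the skipped list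
theorem mem_fold2 (l p : List String) (x : String) :
    x ∈ l.foldl (fun p step => if PySem.Set.contains skippableStepsPy step then p.filter (fun s => s != step) else p) p ↔
      x ∈ p ∧ (skippableStepsPy.contains x = true → x ∉ l) := by
  induction l generalizing p with
  | nil => simp
  | cons h t ih =>
    simp only [List.foldl_cons, List.mem_cons]
    by_cases hc : PySem.Set.contains skippableStepsPy h = true
    · rw [if_pos hc, ih]
      simp only [List.mem_filter, bne_iff_ne, ne_eq]
      constructor
      · rintro ⟨⟨hp, hne⟩, hsk⟩
        exact ⟨hp, fun hx => by rintro (rfl | ht); exact hne rfl; exact hsk hx ht⟩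
      · rintro ⟨hp, hsk⟩
        by_cases hxh : x = h
        · subst hxh; exact absurd (Or.inl rfl) (hsk hc)
        · exact ⟨⟨hp, hxh⟩, fun hx ht => hsk hx (Or.inr ht)⟩
    · rw [if_neg hc, ih]
      constructor
      · rintro ⟨hp, hsk⟩
        refine ⟨hp, fun hx => ?_⟩
        rintro (rfl | ht); exact hc hx; exact hsk hx ht
      · rintro ⟨hp, hsk⟩
        exact ⟨hp, fun hx ht => hsk hx (Or.inr ht)⟩

-- the two traversals agree for any completed/skipped lists
theorem loop_eq_worklist (c k : List String) :
    computeLoopA (PySem.Set.ofList c) (PySem.Set.ofList k) onboardingStepsPy =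
      (k.foldl (fun p step => if PySem.Set.contains skippableStepsPy step then p.filter (fun s => s != step) else p)
        (c.foldl (fun p step => p.filter (fun s => s != step)) onboardingStepsPy)).isEmpty := by
  rw [loop_all, Bool.eq_iff_iff, List.isEmpty_iff, List.eq_nil_iff_forall_not_mem]
  constructor
  · intro hall x hx
    rw [mem_fold2, mem_fold1] at hx
    obtain ⟨⟨hpend, hc⟩, hsk⟩ := hx
    have := List.all_eq_true.mp hall x hpend
    by_cases hs : PySem.Set.contains skippableStepsPy x = true
    · rw [if_pos hs] at this
      rcases Bool.or_eq_true_iff.mp this with h | h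
      · exact hc ((PySem.Set.mem_ofList _ _).mp ((PySem.Set.contains_iff _ _).mp h))
      · exact hsk hs ((PySem.Set.mem_ofList _ _).mp ((PySem.Set.contains_iff _ _).mp h))
    · rw [if_neg hs] at this
      exact hc ((PySem.Set.mem_ofList _ _).mp ((PySem.Set.contains_iff _ _).mp this))
  · intro hemp
    rw [List.all_eq_true]
    intro x hx
    have hnot := hemp x
    rw [mem_fold2, mem_fold1] at hnot
    by_cases hs : PySem.Set.contains skippableStepsPy x = true
    · rw [if_pos hs]
      rcases not_and_or.mp hnot with h | h
      · rcases not_and_or.mp h with h' | h'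
        · exact absurd hx h'
        · exact Bool.or_eq_true_iff.mpr (Or.inl ((PySem.Set.contains_iff _ _).mpr
            ((PySem.Set.mem_ofList _ _).mpr (not_not.mp h'))))
      · push Not at h
        exact Bool.or_eq_true_iff.mpr (Or.inr ((PySem.Set.contains_iff _ _).mpr
            ((PySem.Set.mem_ofList _ _).mpr h.2)))
    · rw [if_neg hs]
      rcases not_and_or.mp hnot with h | h
      · rcases not_and_or.mp h with h' | h'
        · exact absurd hx h'
        · exact (PySem.Set.contains_iff _ _).mpr ((PySem.Set.mem_ofList _ _).mpr (not_not.mp h'))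
      · exact absurd (fun hxs _ => hs hxs) h

-- ===== VERDICT (by name: the statement is the Claim_ definition above) =====
theorem compute_complete_py_spec : Claim_equal_compute_complete_py := by
  intro state _
  unfold Spec_compute_complete_py compute_complete_py compute_complete_py_alt
  exact loop_eq_worklist _ _
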